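-- pv_equiv track=rewrite | github.com/rayashi/algorithms | image_matching/image_matching.py | getAdjacentsRegions
-- ===== SOURCE A (Python) =====
-- def getAdjacentsRegions(position, regions):
--   if not regions:
--     return [{ position }]
--   adjacents_regions = []
--
--   # Find adjacents regions
--   for region_index, region in enumerate(regions):
--     for dot in region:
--       if isAdjacent(position, dot):
--         adjacents_regions.append(region_index)
--         break
--
--   if adjacents_regions:
--     return mergeAdjacentsRegions(regions, adjacents_regions, position)
--   else:
--     return regions + [{position}]
--
-- def mergeAdjacentsRegions(regions, adjacents_regions, position):
--   new_region = set()
--   for adjacent_region in adjacents_regions: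
--     new_region.update(regions[adjacent_region])
--
--   new_region.add(position)
--   new_regions = [x for i,x in enumerate(regions) if i not in adjacents_regions]
--   new_regions.append(new_region)
--   return new_regions
--
-- def isAdjacent(position1, position2):
--   if (position2[0] - 1 == position1[0] and position2[1] == position1[1]) or \
--     (position2[0] == position1[0] and position2[1] - 1 == position1[1]) or \
--     (position2[0] == position1[0] and position2[1] + 1 == position1[1]) or \
--     (position2[0] + 1 == position1[0] and position2[1] == position1[1]):
--     return True
--   return False
-- ===== SOURCE B (Python) =====
-- def getAdjacentsRegions(position, regions):
--   if not regions:
--     return [{position}]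
--
--   # Invert: map each dot to the set of region indices containing it
--   owners = {}
--   for i, region in enumerate(regions):
--     for dot in region:
--       owners.setdefault(dot, set()).add(i)
--
--   # The four neighbours of position; union their owning region indices
--   x, y = position
--   adjacent = set()
--   for nb in ((x + 1, y), (x, y + 1), (x, y - 1), (x - 1, y)):
--     adjacent |= owners.get(nb, set())
--
--   if not adjacent:
--     return regions + [{position}]
--
--   merged = set()
--   for i in sorted(adjacent):
--     merged.update(regions[i])
--   merged.add(position)
--   return [r for i, r in enumerate(regions) if i not in adjacent] + [merged]
-- ===== Notes on version B (the rewrite author's own statement) =====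
-- stated objective: alternative
-- what changed: Instead of scanning every region's dots and testing adjacency per dot, B builds an inverted index mapping each dot to the set of region indices that contain it, then looks up only the four neighbour coordinates of position to find the regions to merge.
import Mathlib
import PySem

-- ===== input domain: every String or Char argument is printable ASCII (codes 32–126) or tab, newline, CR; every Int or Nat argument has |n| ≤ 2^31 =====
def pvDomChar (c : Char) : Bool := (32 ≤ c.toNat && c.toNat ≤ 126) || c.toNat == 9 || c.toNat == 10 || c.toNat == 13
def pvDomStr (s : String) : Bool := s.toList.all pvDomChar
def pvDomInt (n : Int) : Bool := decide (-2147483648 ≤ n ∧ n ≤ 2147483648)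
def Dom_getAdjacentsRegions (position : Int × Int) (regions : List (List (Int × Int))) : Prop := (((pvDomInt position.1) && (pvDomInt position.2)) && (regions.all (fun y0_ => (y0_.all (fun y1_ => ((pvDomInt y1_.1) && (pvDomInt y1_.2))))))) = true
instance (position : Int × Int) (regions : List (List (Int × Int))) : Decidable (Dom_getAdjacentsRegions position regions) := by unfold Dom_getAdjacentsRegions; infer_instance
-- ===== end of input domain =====

-- B replaces A's per-region adjacency scan with an inverted index (dot → owning region
-- indices) queried at the four neighbour coordinates (objective: alternative decomposition).

-- ===== PORT A =====
def isAdjacentA (position1 position2 : Int × Int) : Bool :=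
  (position2.1 - 1 == position1.1 && position2.2 == position1.2) ||
  (position2.1 == position1.1 && position2.2 - 1 == position1.2) ||
  (position2.1 == position1.1 && position2.2 + 1 == position1.2) ||
  (position2.1 + 1 == position1.1 && position2.2 == position1.2)

def mergeAdjacentsRegionsA (regions : List (List (Int × Int))) (adjacents_regions : List Int)
    (position : Int × Int) : List (List (Int × Int)) :=
  let new_region : PySem.Set (Int × Int) :=
    adjacents_regions.foldl
      (fun s i => PySem.Set.update s (PySem.List.pyGetD regions i [])) PySem.Set.empty
  let new_region := PySem.Set.add new_region position
  let new_regions :=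
    ((PySem.List.enumerate regions 0).filter (fun p => !(adjacents_regions.contains p.1))).map (·.2)
  new_regions ++ [new_region]

def getAdjacentsRegions (position : Int × Int) (regions : List (List (Int × Int))) : List (List (Int × Int)) :=
  if regions = [] then [[position]]
  else
    -- A appends region_index once per region containing an adjacent dot ('break' = List.any)
    let adjacents_regions : List Int :=
      (PySem.List.enumerate regions 0).foldl
        (fun acc p => if p.2.any (fun dot => isAdjacentA position dot) then acc ++ [p.1] else acc) []
    if adjacents_regions ≠ [] then mergeAdjacentsRegionsA regions adjacents_regions position
    else regions ++ [[position]]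

-- ===== PORT B =====
def neighboursB (position : Int × Int) : List (Int × Int) :=
  [(position.1 + 1, position.2), (position.1, position.2 + 1),
   (position.1, position.2 - 1), (position.1 - 1, position.2)]

-- owners.setdefault(dot, set()).add(i)  ==  owners[dot] = owners.get(dot, set()) ∪ {i}
def ownersB (regions : List (List (Int × Int))) : PySem.Dict (Int × Int) (PySem.Set Int) :=
  (PySem.List.enumerate regions 0).foldl
    (fun d p => p.2.foldl
      (fun d dot => d.insert dot (PySem.Set.add (d.getD dot PySem.Set.empty) p.1)) d)
    PySem.Dict.empty

def getAdjacentsRegions_alt (position : Int × Int) (regions : List (List (Int × Int))) : List (List (Int × Int)) :=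
  if regions = [] then [[position]]
  else
    let owners := ownersB regions
    let adjacent : PySem.Set Int :=
      (neighboursB position).foldl
        (fun s nb => PySem.Set.union s (owners.getD nb PySem.Set.empty)) PySem.Set.empty
    if adjacent = [] then regions ++ [[position]]
    else
      let merged : PySem.Set (Int × Int) :=
        (PySem.List.sorted adjacent (fun i => i) false).foldl
          (fun s i => PySem.Set.update s (PySem.List.pyGetD regions i [])) PySem.Set.empty
      let merged := PySem.Set.add merged position
      ((PySem.List.enumerate regions 0).filter (fun p => !(PySem.Set.contains adjacent p.1))).map (·.2)
        ++ [merged]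

-- ===== PRECONDITION & SPEC =====
def Spec_getAdjacentsRegions (position : Int × Int) (regions : List (List (Int × Int))) (out : List (List (Int × Int))) : Prop := out = getAdjacentsRegions_alt position regions
instance (position : Int × Int) (regions : List (List (Int × Int))) (out : List (List (Int × Int))) : Decidable (Spec_getAdjacentsRegions position regions out) := by unfold Spec_getAdjacentsRegions; infer_instance

-- ===== CLAIM (what is proved, stated in full; the proofs are below) =====
def Claim_equal_getAdjacentsRegions : Prop := ∀ (position : Int × Int) (regions : List (List (Int × Int))), Dom_getAdjacentsRegions position regions → Spec_getAdjacentsRegions position regions (getAdjacentsRegions position regions)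

-- ===== LEMMAS AND PROOFS =====

-- A's adjacency test is exactly membership in B's neighbour list.
lemma isAdjacentA_iff (pos dot : Int × Int) :
    isAdjacentA pos dot = true ↔ dot ∈ neighboursB pos := by
  simp [isAdjacentA, neighboursB, Prod.ext_iff]
  omega

-- one region's inner loop: what ends up under each key of the index
lemma mem_inner (ds : List (Int × Int)) (i : Int) (d : PySem.Dict (Int × Int) (PySem.Set Int))
    (dot : Int × Int) (j : Int) :
    j ∈ (ds.foldl (fun d dot' => d.insert dot' (PySem.Set.add (d.getD dot' PySem.Set.empty) i)) d).getD dot PySem.Set.empty ↔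
      j ∈ d.getD dot PySem.Set.empty ∨ (j = i ∧ dot ∈ ds) := by
  induction ds generalizing d with
  | nil => simp
  | cons hd tl ih =>
    simp only [List.foldl_cons, ih, PySem.Dict.getD_insert, List.mem_cons]
    by_cases h : dot = hd
    · subst h; simp [PySem.Set.mem_add]; tauto
    · simp [h]

-- membership in the full inverted index
lemma mem_outer (l : List (Int × List (Int × Int))) (d : PySem.Dict (Int × Int) (PySem.Set Int))
    (dot : Int × Int) (j : Int) :
    j ∈ (l.foldl (fun d p => p.2.foldl (fun d dot' => d.insert dot' (PySem.Set.add (d.getD dot' PySem.Set.empty) p.1)) d) d).getD dot PySem.Set.empty ↔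
      j ∈ d.getD dot PySem.Set.empty ∨ ∃ p ∈ l, p.1 = j ∧ dot ∈ p.2 := by
  induction l generalizing d with
  | nil => simp
  | cons hd tl ih =>
    simp only [List.foldl_cons, ih, mem_inner, List.mem_cons]
    constructor
    · rintro ((h | ⟨rfl, h⟩) | h)
      · exact .inl h
      · exact .inr ⟨hd, .inl rfl, rfl, h⟩
      · obtain ⟨p, hp, h⟩ := h; exact .inr ⟨p, .inr hp, h⟩
    · rintro (h | ⟨p, (rfl | hp), h1, h2⟩)
      · exact .inl (.inl h)
      · exact .inl (.inr ⟨h1.symm, h2⟩)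
      · exact .inr ⟨p, hp, h1, h2⟩

lemma mem_foldl_union {α : Type} [BEq α] [LawfulBEq α] (nbs : List (Int × Int))
    (g : Int × Int → PySem.Set α) (s : PySem.Set α) (j : α) :
    j ∈ nbs.foldl (fun s nb => PySem.Set.union s (g nb)) s ↔ j ∈ s ∨ ∃ nb ∈ nbs, j ∈ g nb := by
  induction nbs generalizing s with
  | nil => simp
  | cons hd tl ih => simp [ih, PySem.Set.mem_union]; tauto

lemma nodup_foldl_union {α : Type} [BEq α] [LawfulBEq α] (nbs : List (Int × Int))
    (g : Int × Int → PySem.Set α) (s : PySem.Set α) (h : s.Nodup) :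
    (nbs.foldl (fun s nb => PySem.Set.union s (g nb)) s).Nodup := by
  induction nbs generalizing s with
  | nil => exact h
  | cons hd tl ih => exact ih _ (PySem.Set.nodup_union _ _ h)

-- membership in B's adjacent index set = "region j has a dot adjacent to position"
lemma mem_adjacentB (position : Int × Int) (regions : List (List (Int × Int))) (j : Int) :
    j ∈ (neighboursB position).foldl
        (fun s nb => PySem.Set.union s ((ownersB regions).getD nb PySem.Set.empty)) PySem.Set.empty ↔
      ∃ p ∈ PySem.List.enumerate regions 0, p.1 = j ∧ p.2.any (fun dot => isAdjacentA position dot) := by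
  rw [mem_foldl_union]
  simp only [ownersB, mem_outer, List.any_eq_true]
  constructor
  · rintro (h | ⟨nb, hnb, (h | ⟨p, hp, h1, h2⟩)⟩)
    · simp [PySem.Set.empty] at h
    · simp [PySem.Dict.getD_empty, PySem.Set.empty] at h
    · exact ⟨p, hp, h1, nb, h2, (isAdjacentA_iff position nb).mpr hnb⟩
  · rintro ⟨p, hp, h1, dot, hdot, hadj⟩
    exact .inr ⟨dot, (isAdjacentA_iff position dot).mp hadj, .inr ⟨p, hp, h1, hdot⟩⟩

-- sorted(B's adjacent set) is exactly A's (increasing) index list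
lemma adjA_eq_sorted (position : Int × Int) (regions : List (List (Int × Int))) :
    PySem.List.sorted
        ((neighboursB position).foldl
          (fun s nb => PySem.Set.union s ((ownersB regions).getD nb PySem.Set.empty)) PySem.Set.empty)
        (fun i => i) false =
      (PySem.List.enumerate regions 0).foldl
        (fun acc p => if p.2.any (fun dot => isAdjacentA position dot) then acc ++ [p.1] else acc) [] := by
  rw [PySem.List.foldl_append_if]
  apply PySem.List.sorted_eq_of_perm_of_pairwise_lt
  · rw [List.nil_append, List.perm_ext_iff_of_nodup]
    · intro j
      simp only [List.mem_map, List.mem_filter, mem_adjacentB]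
      tauto
    · have hpw := (PySem.List.pairwise_lt_enumerate regions (0:Int)).filter
        (fun p => p.2.any (fun dot => isAdjacentA position dot))
      exact (List.pairwise_map.mpr hpw).imp ne_of_lt
    · exact nodup_foldl_union _ _ _ List.nodup_nil
  · rw [List.nil_append, List.pairwise_map]
    exact List.Pairwise.filter _ (PySem.List.pairwise_lt_enumerate regions 0)

theorem main_eq (position : Int × Int) (regions : List (List (Int × Int))) :
    getAdjacentsRegions position regions = getAdjacentsRegions_alt position regions := by
  unfold getAdjacentsRegions getAdjacentsRegions_alt
  by_cases hreg : regions = []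
  · simp [hreg]
  · simp only [if_neg hreg]
    have hs := adjA_eq_sorted position regions
    set adjS := (neighboursB position).foldl
        (fun s nb => PySem.Set.union s ((ownersB regions).getD nb PySem.Set.empty)) PySem.Set.empty with hadjS
    set adjA := (PySem.List.enumerate regions 0).foldl
        (fun acc p => if p.2.any (fun dot => isAdjacentA position dot) then acc ++ [p.1] else acc) ([] : List Int) with hadjA
    by_cases hempty : adjS = []
    · have : adjA = [] := by rw [← hs, hempty]; rfl
      simp [this, hempty]
    · have hne : adjA ≠ [] := by
        rw [← hs]; simpa using (PySem.List.sorted_eq_nil_iff (xs := adjS) (key := fun i => i) (rev := false)).not.mpr hempty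
      rw [if_neg hempty, if_pos hne]
      unfold mergeAdjacentsRegionsA
      rw [hs]
      have hmem : ∀ j : Int, j ∈ adjA ↔ j ∈ adjS := by
        intro j; rw [← hs, PySem.List.mem_sorted]
      have hc : ∀ j : Int, adjA.contains j = PySem.Set.contains adjS j := by
        intro j
        rw [Bool.eq_iff_iff, PySem.Set.contains_iff, List.contains_iff_mem]
        exact hmem j
      simp only [hc]

-- ===== VERDICT (by name: the statement is the Claim_ definition above) =====
theorem getAdjacentsRegions_spec : Claim_equal_getAdjacentsRegions := by
  intro position regions _
  unfold Spec_getAdjacentsRegions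
  exact main_eq position regions
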